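-- pv_equiv track=rewrite | github.com/PIETERSEelmeEP/ListsAndFunctions | WorkAbsences.py | find_above_average
-- ===== SOURCE A (Python) =====
-- def find_above_average(absences, average):
--     above_average = []
--     for name, days in absences:
--         if days > average:
--             above_average.append((name, days))
--     if above_average:
--         max_days = above_average[0][1]
--         most_absent = above_average[0]
--         for name, days in above_average:
--             if days > max_days:
--                 max_days = days
--                 most_absent = (name, days)
--         return most_absent
--     else:
--         return None
-- ===== SOURCE B (Python) =====
-- def find_above_average(absences, average):
--     most_absent = None
--     for name, days in absences:
--         if days > average and (most_absent is None or days > most_absent[1]):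
--             most_absent = (name, days)
--     return most_absent
-- ===== Notes on version B (the rewrite author's own statement) =====
-- stated objective: simpler
-- what changed: B fuses A's two passes (build the above-average list, then scan it for the max) into one single-pass loop with an Option accumulator, never materializing the intermediate list.
import Mathlib
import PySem

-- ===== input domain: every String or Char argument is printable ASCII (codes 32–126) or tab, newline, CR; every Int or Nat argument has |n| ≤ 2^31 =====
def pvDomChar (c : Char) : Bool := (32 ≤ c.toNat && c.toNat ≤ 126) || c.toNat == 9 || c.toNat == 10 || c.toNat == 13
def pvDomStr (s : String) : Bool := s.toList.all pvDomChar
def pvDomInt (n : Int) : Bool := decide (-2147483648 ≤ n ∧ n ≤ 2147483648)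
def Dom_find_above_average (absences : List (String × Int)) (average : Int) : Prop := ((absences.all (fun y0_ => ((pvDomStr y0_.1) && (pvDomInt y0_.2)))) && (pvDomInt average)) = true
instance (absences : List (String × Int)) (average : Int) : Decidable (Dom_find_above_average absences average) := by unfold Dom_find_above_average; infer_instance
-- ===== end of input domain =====

-- B fuses A's two passes (filter into a list, then max-scan it) into one single-pass
-- loop with an Option accumulator; objective: simpler (no intermediate list).

-- ===== PORT A =====
-- literal port: build above_average, then scan it with (max_days, most_absent)
def find_above_average (absences : List (String × Int)) (average : Int) : Option (String × Int) :=
  let above_average :=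
    absences.foldl (fun acc p => if p.2 > average then acc ++ [p] else acc) []
  match above_average with
  | [] => none
  | h :: _ =>
    let st := above_average.foldl
      (fun (s : Int × (String × Int)) p => if p.2 > s.1 then (p.2, p) else s) (h.2, h)
    some st.2

-- ===== PORT B =====
def find_above_average_alt (absences : List (String × Int)) (average : Int) : Option (String × Int) :=
  absences.foldl
    (fun (most_absent : Option (String × Int)) p =>
      if p.2 > average ∧ (most_absent = none ∨ ∃ m, most_absent = some m ∧ p.2 > m.2) then
        some p
      else most_absent)
    none

-- ===== PRECONDITION & SPEC =====
def Spec_find_above_average (absences : List (String × Int)) (average : Int) (out : Option (String × Int)) : Prop := out = find_above_average_alt absences average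
instance (absences : List (String × Int)) (average : Int) (out : Option (String × Int)) : Decidable (Spec_find_above_average absences average out) := by unfold Spec_find_above_average; infer_instance

-- ===== CLAIM (what is proved, stated in full; the proofs are below) =====
def Claim_equal_find_above_average : Prop := ∀ (absences : List (String × Int)) (average : Int), Dom_find_above_average absences average → Spec_find_above_average absences average (find_above_average absences average)

-- ===== LEMMAS AND PROOFS =====

-- A's first loop is List.filter
theorem foldl_filter (average : Int) (xs : List (String × Int)) (acc : List (String × Int)) :
    xs.foldl (fun acc p => if p.2 > average then acc ++ [p] else acc) acc
      = acc ++ xs.filter (fun p => decide (p.2 > average)) := by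
  induction xs generalizing acc with
  | nil => simp
  | cons h t ih =>
    simp only [List.foldl_cons, List.filter_cons]
    by_cases hc : h.2 > average
    · simp [hc, ih]
    · simp [hc, ih]

-- A's second loop, with the redundant max_days component dropped
theorem scan_pair (t : List (String × Int)) (m : String × Int) :
    t.foldl (fun (s : Int × (String × Int)) p => if p.2 > s.1 then (p.2, p) else s) (m.2, m)
      = (((t.foldl (fun (m : String × Int) p => if p.2 > m.2 then p else m) m)).2,
          t.foldl (fun (m : String × Int) p => if p.2 > m.2 then p else m) m) := by
  induction t generalizing m with
  | nil => simp
  | cons h t ih =>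
    simp only [List.foldl_cons]
    by_cases hc : h.2 > m.2 <;> simp [hc, ih]

-- B's fold equals the plain max-scan over the filtered list, started from `some m`
theorem alt_fold_some (average : Int) (xs : List (String × Int)) (m : String × Int) :
    xs.foldl
      (fun (s : Option (String × Int)) p =>
        if p.2 > average ∧ (s = none ∨ ∃ q, s = some q ∧ p.2 > q.2) then some p else s)
      (some m)
      = some ((xs.filter (fun p => decide (p.2 > average))).foldl
          (fun (m : String × Int) p => if p.2 > m.2 then p else m) m) := by
  induction xs generalizing m with
  | nil => simp
  | cons h t ih =>
    simp only [List.foldl_cons, List.filter_cons]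
    by_cases ha : h.2 > average
    · by_cases hm : h.2 > m.2
      · simp [ha, hm, ih]
      · simp [ha, hm, ih]
    · simp [ha, ih]

-- B's fold from `none`, characterised by the filtered list
theorem alt_fold_none (average : Int) (xs : List (String × Int)) :
    find_above_average_alt xs average
      = match xs.filter (fun p => decide (p.2 > average)) with
        | [] => none
        | h :: t => some (t.foldl (fun (m : String × Int) p => if p.2 > m.2 then p else m) h) := by
  unfold find_above_average_alt
  induction xs with
  | nil => simp
  | cons h t ih =>
    simp only [List.foldl_cons, List.filter_cons]
    by_cases ha : h.2 > average
    · rw [if_pos (by simp [ha])]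
      simp only [ha, decide_true, if_true]
      rw [alt_fold_some]
    · rw [if_neg (by simp [ha])]
      simp only [ha, decide_false, Bool.false_eq_true, if_false]
      exact ih

-- ===== VERDICT (by name: the statement is the Claim_ definition above) =====
theorem find_above_average_spec : Claim_equal_find_above_average := by
  intro absences average _
  unfold Spec_find_above_average
  unfold find_above_average
  rw [alt_fold_none, foldl_filter]
  simp only [List.nil_append]
  cases hf : absences.filter (fun p => decide (p.2 > average)) with
  | nil => simp
  | cons h t =>
    simp only [List.foldl_cons]
    rw [if_neg (lt_irrefl _), scan_pair]
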